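-- pv_equiv track=rewrite | github.com/grid-creators/fg2marc21 | backend/utils.py | _split_name_prefix
-- ===== SOURCE A (Python) =====
-- _NAME_PREFIXES = [
--     "von der", "von dem", "von den",
--     "van der", "van den", "van het",
--     "de la", "de le", "de los", "de las", "de l'",
--     "du", "de", "di", "da", "del", "della", "dei", "degli",
--     "von", "vom", "zum", "zur", "zu",
--     "van", "ver", "ten", "ter",
--     "le", "la", "les", "l'",
--     "el", "al", "ul",
--     "dos", "das", "do",
--     "af", "av",
-- ]
--
-- def _split_name_prefix(family_name):
--     """Split a family name into (core_name, prefix).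
--
--     E.g. "von Goethe" -> ("Goethe", "von")
--          "van der Waals" -> ("Waals", "van der")
--          "Mueller" -> ("Mueller", "")
--     """
--     lower = family_name.lower()
--     for prefix in _NAME_PREFIXES:
--         if lower.startswith(prefix + " "):
--             core = family_name[len(prefix) + 1:]
--             original_prefix = family_name[:len(prefix)]
--             return core.strip(), original_prefix.strip()
--     return family_name, ""
-- ===== SOURCE B (Python) =====
-- _TWO_WORD_PREFIXES = frozenset([
--     "von der", "von dem", "von den",
--     "van der", "van den", "van het",
--     "de la", "de le", "de los", "de las", "de l'",
-- ])
--
-- _ONE_WORD_PREFIXES = frozenset([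
--     "du", "de", "di", "da", "del", "della", "dei", "degli",
--     "von", "vom", "zum", "zur", "zu",
--     "van", "ver", "ten", "ter",
--     "le", "la", "les", "l'",
--     "el", "al", "ul",
--     "dos", "das", "do",
--     "af", "av",
-- ])
--
-- def _split_name_prefix(family_name):
--     """Split a family name into (core_name, prefix).
--
--     Instead of scanning a 40-entry table with startswith, split the lowered
--     name on single spaces once and probe two frozensets: first the joined
--     leading two tokens (possible only when at least three tokens exist, so a
--     separating space follows), then the leading token alone."""
--     lower = family_name.lower()
--     parts = lower.split(" ")
--     if len(parts) > 2:
--         two = parts[0] + " " + parts[1]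
--         if two in _TWO_WORD_PREFIXES:
--             return family_name[len(two) + 1:].strip(), family_name[:len(two)].strip()
--     if len(parts) > 1 and parts[0] in _ONE_WORD_PREFIXES:
--         one = parts[0]
--         return family_name[len(one) + 1:].strip(), family_name[:len(one)].strip()
--     return family_name, ""
-- ===== Notes on version B (the rewrite author's own statement) =====
-- stated objective: alternative
-- what changed: Instead of scanning the 40-entry prefix table with startswith per entry, B splits the lowered name on spaces once and probes two frozensets (two-word prefixes keyed by the joined first two tokens when at least three tokens exist, then one-word prefixes keyed by the first token), so there is no loop over the table at all.
import Mathlib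
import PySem

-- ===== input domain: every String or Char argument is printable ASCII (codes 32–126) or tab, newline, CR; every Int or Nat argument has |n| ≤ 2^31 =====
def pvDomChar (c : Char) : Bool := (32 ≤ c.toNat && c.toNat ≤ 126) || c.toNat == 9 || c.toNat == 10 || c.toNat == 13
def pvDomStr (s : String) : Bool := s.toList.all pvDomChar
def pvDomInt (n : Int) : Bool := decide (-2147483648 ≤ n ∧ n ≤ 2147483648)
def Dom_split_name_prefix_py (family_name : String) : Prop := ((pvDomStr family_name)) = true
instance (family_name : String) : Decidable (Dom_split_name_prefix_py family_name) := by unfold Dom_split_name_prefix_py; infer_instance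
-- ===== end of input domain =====

-- B replaces A's startswith scan over the 40-entry prefix table by one split of the
-- lowered name on spaces plus two frozenset probes keyed by the leading tokens
-- (objective: alternative).

-- ===== PORT A =====
def pvNamePrefixes : List String :=
  ["von der", "von dem", "von den",
   "van der", "van den", "van het",
   "de la", "de le", "de los", "de las", "de l'",
   "du", "de", "di", "da", "del", "della", "dei", "degli",
   "von", "vom", "zum", "zur", "zu",
   "van", "ver", "ten", "ter",
   "le", "la", "les", "l'",
   "el", "al", "ul",
   "dos", "das", "do",
   "af", "av"]

def pvScanA (family_name lower : String) : List String → String × String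
  | [] => (family_name, "")
  | p :: rest =>
    if PySem.Str.startswith lower (p ++ " ") then
      (PySem.Str.strip (PySem.Str.slice family_name (some (PySem.Str.len p + 1)) none),
       PySem.Str.strip (PySem.Str.slice family_name none (some (PySem.Str.len p))))
    else pvScanA family_name lower rest

def split_name_prefix_py (family_name : String) : String × String :=
  pvScanA family_name (PySem.Str.lower family_name) pvNamePrefixes

-- ===== PORT B =====
def pvTwoWordSet : PySem.Set String :=
  PySem.Set.ofList
    ["von der", "von dem", "von den",
     "van der", "van den", "van het",
     "de la", "de le", "de los", "de las", "de l'"]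

def pvOneWordSet : PySem.Set String :=
  PySem.Set.ofList
    ["du", "de", "di", "da", "del", "della", "dei", "degli",
     "von", "vom", "zum", "zur", "zu",
     "van", "ver", "ten", "ter",
     "le", "la", "les", "l'",
     "el", "al", "ul",
     "dos", "das", "do",
     "af", "av"]

-- family_name[len(pfx)+1:].strip(), family_name[:len(pfx)].strip()
def pvCut (family_name : String) (k : Int) : String × String :=
  (PySem.Str.strip (PySem.Str.slice family_name (some (k + 1)) none),
   PySem.Str.strip (PySem.Str.slice family_name none (some k)))

-- the 'len(parts) > 1 and parts[0] in _ONE_WORD_PREFIXES' branch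
def pvOneStep (family_name : String) (parts : List String) : String × String :=
  match parts with
  | p0 :: _ :: _ =>
    if PySem.Set.contains pvOneWordSet p0 then pvCut family_name (PySem.Str.len p0)
    else (family_name, "")
  | _ => (family_name, "")

-- the 'len(parts) > 2' branch, falling through to pvOneStep
def pvTwoStep (family_name : String) (parts : List String) : String × String :=
  match parts with
  | p0 :: p1 :: _ :: _ =>
    let two := p0 ++ " " ++ p1
    if PySem.Set.contains pvTwoWordSet two then pvCut family_name (PySem.Str.len two)
    else pvOneStep family_name parts
  | _ => pvOneStep family_name parts

def split_name_prefix_py_alt (family_name : String) : String × String :=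
  let lower := PySem.Str.lower family_name
  -- lower.split(" "): the separator " " is nonempty, so PySem.Str.split? is always `some` — exact
  let parts := (PySem.Str.split? lower " ").getD []
  pvTwoStep family_name parts

-- ===== PRECONDITION & SPEC =====
def Spec_split_name_prefix_py (family_name : String) (out : String × String) : Prop := out = split_name_prefix_py_alt family_name
instance (family_name : String) (out : String × String) : Decidable (Spec_split_name_prefix_py family_name out) := by unfold Spec_split_name_prefix_py; infer_instance

-- ===== CLAIM (what is proved, stated in full; the proofs are below) =====
def Claim_equal_split_name_prefix_py : Prop := ∀ (family_name : String), Dom_split_name_prefix_py family_name → Spec_split_name_prefix_py family_name (split_name_prefix_py family_name)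

-- ===== LEMMAS AND PROOFS =====

-- A structural reformulation of PySem.Chars.splitOn for the one-character separator ' '.
def pvSplitC : List Char → List Char → List (List Char)
  | [], cur => [cur.reverse]
  | c :: rest, cur => if c = ' ' then cur.reverse :: pvSplitC rest [] else pvSplitC rest (c :: cur)

lemma pvGo_eq : ∀ (fuel : Nat) (l cur : List Char) (acc : List (List Char)), l.length < fuel →
    PySem.Chars.splitOn.go [' '] fuel l cur acc = acc.reverse ++ pvSplitC l cur := by
  intro fuel
  induction fuel with
  | zero => intro l cur acc h; omega
  | succ f ih =>
    intro l cur acc h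
    cases l with
    | nil => simp [PySem.Chars.splitOn.go, pvSplitC]
    | cons c rest =>
      by_cases hc : c = ' '
      · subst hc
        rw [PySem.Chars.splitOn.go]
        simp only [List.isPrefixOf, BEq.rfl, Bool.true_and, if_pos]
        rw [ih _ _ _ (by simpa using Nat.lt_of_succ_lt_succ h)]
        simp [pvSplitC]
      · rw [PySem.Chars.splitOn.go]
        have : ([' '].isPrefixOf (c :: rest)) = false := by
          simp [List.isPrefixOf]; exact fun hh => (hc hh.symm).elim
        rw [this]
        simp only [Bool.false_eq_true, if_neg, not_false_iff]
        rw [ih _ _ _ (by simpa using Nat.lt_of_succ_lt_succ h)]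
        simp [pvSplitC, hc]

lemma pvSplitOn_eq (l : List Char) : PySem.Chars.splitOn l [' '] = pvSplitC l [] := by
  unfold PySem.Chars.splitOn
  rw [pvGo_eq _ _ _ _ (by omega)]
  simp

lemma pvSplitC_ne_nil : ∀ (l cur : List Char), pvSplitC l cur ≠ [] := by
  intro l
  induction l with
  | nil => intro cur; simp [pvSplitC]
  | cons c rest ih =>
    intro cur
    rw [pvSplitC]
    by_cases hc : c = ' '
    · rw [if_pos hc]; simp
    · rw [if_neg hc]; exact ih _

lemma pvSplitC_nospace : ∀ (a cur : List Char), ' ' ∉ a → pvSplitC a cur = [cur.reverse ++ a] := by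
  intro a
  induction a with
  | nil => intro cur _; simp [pvSplitC]
  | cons c rest ih =>
    intro cur h
    have hc : ¬ c = ' ' := fun hh => h (by simp [hh])
    rw [pvSplitC, if_neg hc, ih _ (fun hm => h (List.mem_cons_of_mem _ hm))]
    simp

lemma pvSplitC_break : ∀ (a t cur : List Char), ' ' ∉ a →
    pvSplitC (a ++ ' ' :: t) cur = (cur.reverse ++ a) :: pvSplitC t [] := by
  intro a
  induction a with
  | nil => intro t cur _; simp [pvSplitC]
  | cons c rest ih =>
    intro t cur h
    have hc : ¬ c = ' ' := fun hh => h (by simp [hh])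
    rw [List.cons_append, pvSplitC, if_neg hc, ih _ _ (fun hm => h (List.mem_cons_of_mem _ hm))]
    simp

lemma pvFirstSplit {l : List Char} (h : ' ' ∈ l) : ∃ u t, l = u ++ ' ' :: t ∧ ' ' ∉ u := by
  induction l with
  | nil => simp at h
  | cons c rest ih =>
    by_cases hc : c = ' '
    · exact ⟨[], rest, by simp [hc], by simp⟩
    · have hr : ' ' ∈ rest := by
        rcases List.mem_cons.mp h with h1 | h1
        · exact (hc h1.symm).elim
        · exact h1
      obtain ⟨u, t, hl, hu⟩ := ih hr
      exact ⟨c :: u, t, by simp [hl], by simp [hu]; exact fun hh => hc hh.symm⟩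

lemma pvPrefixSplit (a b x y : List Char) (ha : ' ' ∉ a) (hb : ' ' ∉ b) :
    a ++ ' ' :: x <+: b ++ ' ' :: y ↔ a = b ∧ x <+: y := by
  induction a generalizing b with
  | nil =>
    cases b with
    | nil => simp [List.cons_prefix_cons]
    | cons d b' =>
      simp only [List.nil_append, List.cons_append, List.cons_prefix_cons]
      constructor
      · rintro ⟨h1, _⟩; exact absurd (by simp [← h1]) hb
      · rintro ⟨h1, _⟩; exact absurd h1.symm (by simp)
  | cons c a' ih =>
    cases b with
    | nil =>
      simp only [List.cons_append, List.nil_append, List.cons_prefix_cons]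
      constructor
      · rintro ⟨h1, _⟩; exact absurd (by simp [h1]) ha
      · rintro ⟨h1, _⟩; simp at h1
    | cons d b' =>
      simp only [List.cons_append, List.cons_prefix_cons]
      rw [ih b' (fun hm => ha (List.mem_cons_of_mem _ hm)) (fun hm => hb (List.mem_cons_of_mem _ hm))]
      constructor
      · rintro ⟨h1, h2, h3⟩; exact ⟨by simp [h1, h2], h3⟩
      · rintro ⟨h1, h2⟩
        rw [List.cons.injEq] at h1
        exact ⟨h1.1, h1.2, h2⟩

lemma pvPrefixWord (a b y : List Char) (ha : ' ' ∉ a) (hb : ' ' ∉ b) :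
    a ++ [' '] <+: b ++ ' ' :: y ↔ a = b := by
  have := pvPrefixSplit a b [] y ha hb
  rw [show a ++ [' '] = a ++ ' ' :: ([] : List Char) from rfl, this]
  simp

lemma pvEqSplit (a b x y : List Char) (ha : ' ' ∉ a) (hb : ' ' ∉ b) :
    a ++ ' ' :: x = b ++ ' ' :: y ↔ a = b ∧ x = y := by
  constructor
  · intro h
    have h1 : a = b := by
      have hp : a ++ ' ' :: x <+: b ++ ' ' :: y := h ▸ List.prefix_refl _
      exact ((pvPrefixSplit a b x y ha hb).mp hp).1
    subst h1
    exact ⟨rfl, by simpa using h⟩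
  · rintro ⟨rfl, rfl⟩; rfl

-- the branch value both programs return, as a function of the matched prefix length
def pvRetL (family_name : String) (k : Nat) : String × String :=
  (PySem.Str.strip (PySem.Str.slice family_name (some ((k : Int) + 1)) none),
   PySem.Str.strip (PySem.Str.slice family_name none (some (k : Int))))

lemma pvScanA_findSome? (fn lower : String) : ∀ ps : List String,
    pvScanA fn lower ps =
      (ps.findSome? (fun p => if PySem.Str.startswith lower (p ++ " ") then
          some (pvRetL fn p.toList.length) else none)).getD (fn, "") := by
  intro ps
  induction ps with
  | nil => simp [pvScanA]
  | cons p rest ih =>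
    rw [pvScanA, List.findSome?_cons]
    by_cases h : PySem.Str.startswith lower (p ++ " ") = true
    · rw [if_pos h, if_pos h]; rfl
    · rw [if_neg h, if_neg h]; exact ih

lemma pvFindSome?_congr {α β : Type} (f g : α → Option β) :
    ∀ ps : List α, (∀ p ∈ ps, f p = g p) → ps.findSome? f = ps.findSome? g := by
  intro ps
  induction ps with
  | nil => intro _; rfl
  | cons p rest ih =>
    intro h
    rw [List.findSome?_cons, List.findSome?_cons, h p (by simp), ih (fun q hq => h q (by simp [hq]))]

lemma pvFindSome?_none {α β : Type} :
    ∀ ps : List α, ps.findSome? (fun _ => (none : Option β)) = none := by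
  intro ps
  induction ps with
  | nil => rfl
  | cons p rest ih => rw [List.findSome?_cons]; exact ih

lemma pvLookup {α R : Type} [DecidableEq α] (key : List Char → α) (F : α → R) (x : α) :
    ∀ ps : List String,
      (ps.findSome? fun p => if x = key p.toList then some (F (key p.toList)) else none)
        = if ∃ p ∈ ps, x = key p.toList then some (F x) else none := by
  intro ps
  induction ps with
  | nil => simp
  | cons p rest ih =>
    rw [List.findSome?_cons]
    by_cases h : x = key p.toList
    · simp [h]
    · simp only [h, if_neg, not_false_iff, ih]
      by_cases h2 : ∃ q ∈ rest, x = key q.toList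
      · rw [if_pos h2, if_pos (by rcases h2 with ⟨q, hq, he⟩; exact ⟨q, by simp [hq], he⟩)]
      · rw [if_neg h2, if_neg (by rintro ⟨q, hq, he⟩; rcases List.mem_cons.mp hq with rfl | hq2
                                  · exact h he
                                  · exact h2 ⟨q, hq2, he⟩)]

def pvTwo : List String :=
  ["von der", "von dem", "von den", "van der", "van den", "van het",
   "de la", "de le", "de los", "de las", "de l'"]

def pvOne : List String :=
  ["du", "de", "di", "da", "del", "della", "dei", "degli",
   "von", "vom", "zum", "zur", "zu", "van", "ver", "ten", "ter",
   "le", "la", "les", "l'", "el", "al", "ul", "dos", "das", "do", "af", "av"]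

lemma pvListSplit : pvNamePrefixes = pvTwo ++ pvOne := rfl

def pvW1 (p : String) : List Char := p.toList.takeWhile (· ≠ ' ')
def pvW2 (p : String) : List Char := (p.toList.dropWhile (· ≠ ' ')).tail

lemma pvTwoFact : ∀ p ∈ pvTwo,
    p.toList = pvW1 p ++ ' ' :: pvW2 p ∧ ' ' ∉ pvW1 p ∧ ' ' ∉ pvW2 p ∧ ' ' ∈ p.toList := by decide

lemma pvOneFact : ∀ p ∈ pvOne, ' ' ∉ p.toList := by decide

lemma pvSw (lower : String) (q : String) :
    ((PySem.Str.startswith lower (q ++ " ")) = true) ↔ (q.toList ++ [' ']) <+: lower.toList := by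
  rw [PySem.Str.startswith_eq, PySem.Chars.startswith_iff, String.toList_append]
  rfl

lemma pvParts (lower : String) :
    (PySem.Str.split? lower " ").getD [] = (pvSplitC lower.toList []).map String.ofList := by
  simp only [PySem.Str.split?, PySem.Chars.split?]
  rw [show (" " : String).toList = [' '] from rfl]
  simp [pvSplitOn_eq]

-- the one-word phase of A: scanning pvOne equals a lookup of the first token u
lemma pvOneSeg (fn lower : String) (u t : List Char) (hu : ' ' ∉ u)
    (hl : lower.toList = u ++ ' ' :: t) :
    List.findSome? (fun p => if PySem.Str.startswith lower (p ++ " ") then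
        some (pvRetL fn p.toList.length) else none) pvOne
      = if ∃ p ∈ pvOne, u = p.toList then some (pvRetL fn u.length) else none := by
  rw [pvFindSome?_congr _
      (fun p => if u = (fun cs => cs) p.toList then
        some ((fun cs : List Char => pvRetL fn cs.length) ((fun cs => cs) p.toList)) else none) _ ?_]
  · exact pvLookup (fun cs => cs) (fun cs : List Char => pvRetL fn cs.length) u pvOne
  · intro p hp
    beta_reduce
    have hiff : (PySem.Str.startswith lower (p ++ " ") = true) ↔ u = p.toList := by
      rw [pvSw, hl, pvPrefixWord p.toList u t (pvOneFact p hp) hu, eq_comm]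
    by_cases hc : u = p.toList
    · rw [if_pos (hiff.mpr hc), if_pos hc]
    · rw [if_neg (fun hh => hc (hiff.mp hh)), if_neg hc]

-- the two-word phase of A when the remainder t itself splits as v ++ ' ' :: w
lemma pvTwoSeg (fn lower : String) (u v w : List Char) (hu : ' ' ∉ u) (hv : ' ' ∉ v)
    (hl : lower.toList = u ++ ' ' :: (v ++ ' ' :: w)) :
    List.findSome? (fun p => if PySem.Str.startswith lower (p ++ " ") then
        some (pvRetL fn p.toList.length) else none) pvTwo
      = if ∃ p ∈ pvTwo, (u, v) = (pvW1 p, pvW2 p) then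
          some (pvRetL fn (u.length + 1 + v.length)) else none := by
  have hkey : ∀ p : String,
      (pvW1 p, pvW2 p) = (p.toList.takeWhile (· ≠ ' '), (p.toList.dropWhile (· ≠ ' ')).tail) :=
    fun p => rfl
  rw [pvFindSome?_congr _
      (fun p => if (u, v) = (fun cs : List Char => (cs.takeWhile (· ≠ ' '), (cs.dropWhile (· ≠ ' ')).tail)) p.toList then
        some ((fun z : List Char × List Char => pvRetL fn (z.1.length + 1 + z.2.length))
          ((fun cs : List Char => (cs.takeWhile (· ≠ ' '), (cs.dropWhile (· ≠ ' ')).tail)) p.toList)) else none) _ ?_]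
  · rw [pvLookup (fun cs : List Char => (cs.takeWhile (· ≠ ' '), (cs.dropWhile (· ≠ ' ')).tail))
        (fun z : List Char × List Char => pvRetL fn (z.1.length + 1 + z.2.length)) (u, v) pvTwo]
    by_cases he : ∃ p ∈ pvTwo, (u, v) = (pvW1 p, pvW2 p)
    · rw [if_pos (by obtain ⟨p, hp, hpe⟩ := he; exact ⟨p, hp, by rw [← hkey p]; exact hpe⟩),
          if_pos he]
    · rw [if_neg (by rintro ⟨p, hp, hpe⟩; exact he ⟨p, hp, by rw [hkey p]; exact hpe⟩),
          if_neg he]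
  · intro p hp
    beta_reduce
    rw [← hkey p]
    obtain ⟨hdec, hw1, hw2, _⟩ := pvTwoFact p hp
    have hiff : (PySem.Str.startswith lower (p ++ " ") = true) ↔ (u, v) = (pvW1 p, pvW2 p) := by
      rw [pvSw, hl, hdec, show (pvW1 p ++ ' ' :: pvW2 p) ++ [' '] = pvW1 p ++ ' ' :: (pvW2 p ++ [' ']) by simp,
          pvPrefixSplit _ _ _ _ hw1 hu, pvPrefixWord _ _ _ hw2 hv, Prod.mk.injEq, eq_comm (a := pvW1 p),
          eq_comm (a := pvW2 p)]
    by_cases hc : (u, v) = (pvW1 p, pvW2 p)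
    · rw [if_pos (hiff.mpr hc), if_pos hc]
      have hlen : p.toList.length = (pvW1 p).length + 1 + (pvW2 p).length := by
        rw [hdec]; simp; omega
      rw [hlen]
    · rw [if_neg (fun hh => hc (hiff.mp hh)), if_neg hc]

-- membership of the joined two-token candidate in B's two-word set
lemma pvMem2 (u v : List Char) (hu : ' ' ∉ u) :
    (PySem.Set.contains pvTwoWordSet (String.ofList (u ++ ' ' :: v)) = true)
      ↔ ∃ p ∈ pvTwo, (u, v) = (pvW1 p, pvW2 p) := by
  rw [show pvTwoWordSet = PySem.Set.ofList pvTwo from rfl]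
  rw [PySem.Set.contains_iff, PySem.Set.mem_ofList]
  constructor
  · intro hm
    obtain ⟨hdec, hw1, hw2, _⟩ := pvTwoFact _ hm
    refine ⟨String.ofList (u ++ ' ' :: v), hm, ?_⟩
    have he : u ++ ' ' :: v
        = pvW1 (String.ofList (u ++ ' ' :: v)) ++ ' ' :: pvW2 (String.ofList (u ++ ' ' :: v)) := by
      conv_lhs => rw [← String.toList_ofList (l := u ++ ' ' :: v)]
      exact hdec
    obtain ⟨h1, h2⟩ := (pvEqSplit _ _ _ _ hu hw1).mp he
    rw [← h1, ← h2]
  · rintro ⟨p, hp, hpe⟩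
    obtain ⟨hdec, hw1, hw2, _⟩ := pvTwoFact p hp
    have h1 : u = pvW1 p := (Prod.mk.injEq _ _ _ _ ▸ hpe).1
    have h2 : v = pvW2 p := (Prod.mk.injEq _ _ _ _ ▸ hpe).2
    have : String.ofList (u ++ ' ' :: v) = p := by
      rw [h1, h2, ← hdec, String.ofList_toList]
    rw [this]
    exact hp

-- membership of the first token in B's one-word set
lemma pvMem1 (u : List Char) :
    (PySem.Set.contains pvOneWordSet (String.ofList u) = true) ↔ ∃ p ∈ pvOne, u = p.toList := by
  rw [show pvOneWordSet = PySem.Set.ofList pvOne from rfl]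
  rw [PySem.Set.contains_iff, PySem.Set.mem_ofList]
  constructor
  · intro hm
    exact ⟨_, hm, (String.toList_ofList (l := u)).symm⟩
  · rintro ⟨p, hp, hpe⟩
    have : String.ofList u = p := by rw [hpe, String.ofList_toList]
    rw [this]
    exact hp

lemma pvJoinToks (u v : List Char) :
    String.ofList u ++ " " ++ String.ofList v = String.ofList (u ++ ' ' :: v) := by
  apply String.toList_injective
  simp [String.toList_append]

lemma pvLenOfList (u : List Char) : PySem.Str.len (String.ofList u) = ((u.length : Nat) : Int) := by
  simp [PySem.Str.len]

lemma pvCut_eq (fn : String) (k : Nat) : pvCut fn ((k : Nat) : Int) = pvRetL fn k := rfl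

theorem pvMain (fn lower : String) :
    pvScanA fn lower pvNamePrefixes =
      pvTwoStep fn ((PySem.Str.split? lower " ").getD []) := by
  rw [pvParts]
  by_cases h1 : ' ' ∈ lower.toList
  · obtain ⟨u, t, hl, hu⟩ := pvFirstSplit h1
    by_cases h2 : ' ' ∈ t
    · -- at least two spaces: parts has ≥ 3 entries
      obtain ⟨v, w, ht, hv⟩ := pvFirstSplit h2
      subst ht
      have hps : pvSplitC lower.toList [] = u :: v :: pvSplitC w [] := by
        rw [hl, pvSplitC_break _ _ _ hu, pvSplitC_break _ _ _ hv]
        simp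
      obtain ⟨r0, rs, hr⟩ : ∃ r0 rs, pvSplitC w [] = r0 :: rs := by
        cases hw : pvSplitC w [] with
        | nil => exact absurd hw (pvSplitC_ne_nil w [])
        | cons r0 rs => exact ⟨r0, rs, rfl⟩
      rw [pvScanA_findSome?, pvListSplit, List.findSome?_append,
          pvTwoSeg fn lower u v w hu hv hl, pvOneSeg fn lower u _ hu hl, hps, hr]
      simp only [List.map_cons, pvTwoStep, pvOneStep, pvJoinToks]
      by_cases hx2 : ∃ p ∈ pvTwo, (u, v) = (pvW1 p, pvW2 p)
      · rw [if_pos hx2, Option.some_or, Option.getD_some, if_pos ((pvMem2 u v hu).mpr hx2),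
            pvLenOfList, show ((u ++ ' ' :: v).length : Int) = (((u.length + 1 + v.length : Nat)) : Int) by simp; omega,
            pvCut_eq]
      · rw [if_neg hx2, Option.none_or,
            if_neg (fun hm => hx2 ((pvMem2 u v hu).mp hm))]
        by_cases hx1 : ∃ p ∈ pvOne, u = p.toList
        · rw [if_pos hx1, Option.getD_some, if_pos ((pvMem1 u).mpr hx1), pvLenOfList, pvCut_eq]
        · rw [if_neg hx1, if_neg (fun hm => hx1 ((pvMem1 u).mp hm))]
          rfl
    · -- exactly one space: parts has exactly 2 entries, only the one-word probe runs
      have hps : pvSplitC lower.toList [] = [u, t] := by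
        rw [hl, pvSplitC_break _ _ _ hu, pvSplitC_nospace _ _ h2]
        simp
      have hTwoNone : List.findSome? (fun p => if PySem.Str.startswith lower (p ++ " ") then
          some (pvRetL fn p.toList.length) else none) pvTwo = none := by
        rw [pvFindSome?_congr _ (fun _ => none) _ ?_]
        · simp
        · intro p hp
          beta_reduce
          obtain ⟨hdec, hw1, hw2, _⟩ := pvTwoFact p hp
          rw [if_neg]
          intro hc
          rw [pvSw, hl, hdec,
              show (pvW1 p ++ ' ' :: pvW2 p) ++ [' '] = pvW1 p ++ ' ' :: (pvW2 p ++ [' ']) by simp,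
              pvPrefixSplit _ _ _ _ hw1 hu] at hc
          exact h2 (hc.2.subset (by simp))
      rw [pvScanA_findSome?, pvListSplit, List.findSome?_append, hTwoNone, Option.none_or,
          pvOneSeg fn lower u t hu hl, hps]
      simp only [List.map_cons, List.map_nil, pvTwoStep, pvOneStep]
      by_cases hx1 : ∃ p ∈ pvOne, u = p.toList
      · rw [if_pos hx1, Option.getD_some, if_pos ((pvMem1 u).mpr hx1), pvLenOfList, pvCut_eq]
      · rw [if_neg hx1, if_neg (fun hm => hx1 ((pvMem1 u).mp hm))]
        rfl
  · -- no space at all: parts is a single entry, nothing matches on either side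
    have hps : pvSplitC lower.toList [] = [lower.toList] := by
      rw [pvSplitC_nospace _ _ h1]
      simp
    have hAnone : ∀ p : String, ¬ (PySem.Str.startswith lower (p ++ " ") = true) := by
      intro p hc
      rw [pvSw] at hc
      exact h1 (hc.subset (by simp))
    rw [pvScanA_findSome?,
        pvFindSome?_congr _ (fun _ => none) _ (fun p _ => if_neg (hAnone p)),
        pvFindSome?_none, hps]
    rfl

-- ===== VERDICT (by name: the statement is the Claim_ definition above) =====
theorem split_name_prefix_py_spec : Claim_equal_split_name_prefix_py := by
  intro fn _
  unfold Spec_split_name_prefix_py split_name_prefix_py split_name_prefix_py_alt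
  exact pvMain fn (PySem.Str.lower fn)
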